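-- pv_equiv track=rewrite | github.com/zyonlooker/Empire-of-Code | three_words.py | three_words
-- ===== SOURCE A (Python) =====
-- def three_words(words):
--     characters = "qwertyuiopasdfghjklzxcvbnmQWERTYUIOPASDFGHJKLZXCVBNM"
--     count = 0
--     words_list = words.split()
--     for word in words_list:
--         if count == 3:
--             break
--         else:
--             flag = 1
--             for letter in word:
--                 if not letter in characters:
--                     flag = 0
--                     count = 0
--                     break
--             if flag == 1:
--                 count += 1
--     if count == 3:
--         return True
--     else:
--         return False
-- ===== SOURCE B (Python) =====
-- def three_words(words):
--     alpha = "qwertyuiopasdfghjklzxcvbnmQWERTYUIOPASDFGHJKLZXCVBNM"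
--     flags = [all(c in alpha for c in w) for w in words.split()]
--     return any(a and b and c for a, b, c in zip(flags, flags[1:], flags[2:]))
-- ===== Notes on version B (the rewrite author's own statement) =====
-- stated objective: idiomatic
-- what changed: Replaces the running counter with reset-on-failure (and early break at 3) by a two-pass decomposition: first compute a boolean letter-word signature for all words, then scan it for three consecutive True flags via zip.
import Mathlib
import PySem

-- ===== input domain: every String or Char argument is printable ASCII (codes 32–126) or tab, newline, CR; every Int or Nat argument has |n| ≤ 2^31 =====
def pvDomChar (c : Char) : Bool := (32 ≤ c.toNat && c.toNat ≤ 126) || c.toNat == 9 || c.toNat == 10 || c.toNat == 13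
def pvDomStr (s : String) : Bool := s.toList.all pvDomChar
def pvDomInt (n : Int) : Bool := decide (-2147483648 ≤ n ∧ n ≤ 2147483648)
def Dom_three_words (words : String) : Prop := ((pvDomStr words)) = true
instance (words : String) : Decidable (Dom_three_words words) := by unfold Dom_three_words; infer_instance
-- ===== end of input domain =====

-- B replaces A's running counter (reset on a non-letter word, early break at 3)
-- by a two-pass decomposition: a per-word letter-flag signature, then a scan for
-- three consecutive flags (objective: idiomatic, same cost).

-- ===== PORT A =====
def pvCharsA : List Char := "qwertyuiopasdfghjklzxcvbnmQWERTYUIOPASDFGHJKLZXCVBNM".toList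

-- inner 'for letter in word' loop of A: returns (flag, count) after the loop
def pvInnerA : List Char → Nat → Nat × Nat
  | [], _count => (1, 0)
  | ch :: rest, count =>
    if ¬ (pvCharsA.contains ch) then (0, 0) else pvInnerA rest count

-- outer 'for word in words_list' loop of A, carrying count (break when count == 3)
def pvLoopA : List String → Nat → Nat
  | [], count => count
  | w :: ws, count =>
    if count == 3 then count
    else
      let r := pvInnerA w.toList count
      pvLoopA ws (if r.1 == 1 then count + 1 else r.2)

def three_words (words : String) : Bool :=
  if pvLoopA (PySem.Str.split₀ words) 0 == 3 then true else false

-- ===== PORT B =====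
def pvAlphaB : List Char := "qwertyuiopasdfghjklzxcvbnmQWERTYUIOPASDFGHJKLZXCVBNM".toList

def pvAllLet (w : String) : Bool := w.toList.all (fun c => pvAlphaB.contains c)

-- 'any(a and b and c for a, b, c in zip(flags, flags[1:], flags[2:]))'
def pvHasRun : List Bool → Bool
  | a :: b :: c :: rest => (a && b && c) || pvHasRun (b :: c :: rest)
  | _ => false

def three_words_alt (words : String) : Bool :=
  pvHasRun ((PySem.Str.split₀ words).map pvAllLet)

-- ===== PRECONDITION & SPEC =====
def Spec_three_words (words : String) (out : Bool) : Prop := out = three_words_alt words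
instance (words : String) (out : Bool) : Decidable (Spec_three_words words out) := by unfold Spec_three_words; infer_instance

-- ===== CLAIM (what is proved, stated in full; the proofs are below) =====
def Claim_equal_three_words : Prop := ∀ (words : String), Dom_three_words words → Spec_three_words words (three_words words)

-- ===== LEMMAS AND PROOFS =====

lemma innerA_eq (cs : List Char) (count : Nat) :
    pvInnerA cs count = if cs.all (fun c => pvCharsA.contains c) then (1, 0) else (0, 0) := by
  induction cs with
  | nil => simp [pvInnerA]
  | cons c rest ih =>
    simp only [pvInnerA, ih, List.all_cons]
    simp only [decide_eq_true_eq, Bool.and_eq_true, List.all_eq_true, List.contains_eq_mem,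
      ite_not]
    split_ifs <;> tauto

lemma hasRun_false_cons (t : List Bool) : pvHasRun (false :: t) = pvHasRun t := by
  match t with
  | [] => simp [pvHasRun]
  | [a] => simp [pvHasRun]
  | a :: b :: r => simp [pvHasRun]

lemma hasRun_true_false (t : List Bool) :
    pvHasRun (true :: false :: t) = pvHasRun t := by
  match t with
  | [] => simp [pvHasRun]
  | a :: r => simp [pvHasRun, hasRun_false_cons]

lemma hasRun_true_true_false (t : List Bool) :
    pvHasRun (true :: true :: false :: t) = pvHasRun t := by
  simp [pvHasRun, hasRun_true_false]

lemma loopA_three (ws : List String) : pvLoopA ws 3 = 3 := by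
  cases ws with
  | nil => rfl
  | cons w t => simp [pvLoopA]

-- characterisation of A's loop on the flag signature
lemma loopA_eq_hasRun (ws : List String) (c : Nat) (hc : c ≤ 2) :
    (pvLoopA ws c == 3) = pvHasRun (List.replicate c true ++ ws.map pvAllLet) := by
  induction ws generalizing c with
  | nil =>
    interval_cases c <;> simp [pvLoopA, pvHasRun]
  | cons w t ih =>
    have hne : (c == 3) = false := by simp; omega
    by_cases hw : pvAllLet w
    · have hwl : w.toList.all (fun ch => pvCharsA.contains ch) = true := by
        simpa [pvAllLet, pvAlphaB, pvCharsA] using hw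
      simp only [pvLoopA, hne, Bool.false_eq_true, if_false, innerA_eq, hwl, List.map_cons, hw]
      interval_cases c
      · simpa using ih 1 (by omega)
      · simpa [List.replicate] using ih 2 (by omega)
      · simp [loopA_three, List.replicate, pvHasRun]
    · have hwl : w.toList.all (fun ch => pvCharsA.contains ch) = false := by
        simpa [pvAllLet, pvAlphaB, pvCharsA] using hw
      have hwf : pvAllLet w = false := by simpa using hw
      simp only [pvLoopA, hne, Bool.false_eq_true, if_false, innerA_eq, hwl, List.map_cons, hwf]
      have ih0 := ih 0 (by omega)
      interval_cases c
      · simpa [hasRun_false_cons] using ih0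
      · simpa [List.replicate, hasRun_true_false] using ih0
      · simpa [List.replicate, hasRun_true_true_false] using ih0

-- ===== VERDICT (by name: the statement is the Claim_ definition above) =====
theorem three_words_spec : Claim_equal_three_words := by
  intro words _
  unfold Spec_three_words three_words three_words_alt
  have h := loopA_eq_hasRun (PySem.Str.split₀ words) 0 (by omega)
  simp only [List.replicate, List.nil_append] at h
  simp [h]
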